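-- pv_equiv track=rewrite | github.com/AESpider/maths | crypto/attack/rsa/know_factor.py | choose_factors_from_list
-- ===== SOURCE A (Python) =====
-- def choose_factors_from_list(n, flist):
--     """Try to pick two factors from flist that multiply to n (return (p,q) or None)."""
--     # common case: flist == [p, q]
--     if len(flist) == 2 and flist[0] * flist[1] == n:
--         return (flist[0], flist[1])
--     # try all pairs (works when DB returns many prime factors)
--     L = flist
--     for i in range(len(L)):
--         for j in range(i + 1, len(L)):
--             if L[i] * L[j] == n:
--                 return (L[i], L[j])
--     return None
-- ===== SOURCE B (Python) =====
-- def choose_factors_from_list(n, flist):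
--     """Try to pick two factors from flist that multiply to n (return (p,q) or None)."""
--     # suffix[v] = number of occurrences of v at indices we have not reached yet
--     suffix = {}
--     for v in flist:
--         suffix[v] = suffix.get(v, 0) + 1
--     for i, v in enumerate(flist):
--         suffix[v] -= 1
--         if v == 0:
--             if n == 0 and i + 1 < len(flist):
--                 return (0, flist[i + 1])
--         elif n % v == 0 and suffix.get(n // v, 0) > 0:
--             return (v, n // v)
--     return None
-- ===== Notes on version B (the rewrite author's own statement) =====
-- stated objective: faster
-- what changed: Replaces the O(m^2) all-pairs double loop by one pass that keeps a suffix-occurrence dictionary and, for each element v, checks divisibility and looks up the cofactor n//v in the dictionary (zero handled separately).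
import Mathlib
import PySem

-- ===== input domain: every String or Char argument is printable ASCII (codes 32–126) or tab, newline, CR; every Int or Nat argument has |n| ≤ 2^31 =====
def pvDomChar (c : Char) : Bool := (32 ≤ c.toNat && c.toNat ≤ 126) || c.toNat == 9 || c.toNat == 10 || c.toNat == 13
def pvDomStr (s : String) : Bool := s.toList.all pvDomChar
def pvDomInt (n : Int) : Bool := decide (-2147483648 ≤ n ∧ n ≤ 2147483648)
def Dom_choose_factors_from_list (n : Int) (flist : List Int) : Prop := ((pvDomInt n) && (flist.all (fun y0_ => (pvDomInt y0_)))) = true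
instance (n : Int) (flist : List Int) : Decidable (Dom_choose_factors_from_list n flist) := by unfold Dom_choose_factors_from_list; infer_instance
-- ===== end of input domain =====

-- B replaces A's O(m^2) all-pairs double loop by a single pass with a suffix-occurrence
-- dictionary and a divisibility check; same return value everywhere (A is total).

-- ===== PORT A =====
-- literal transliteration of A: the len==2 fast path, then the nested index loops
-- (indices produced by range are always in bounds, so pyGetD with default 0 is exact)
def choose_factors_from_list (n : Int) (flist : List Int) : Option (List Int) :=
  if flist.length = 2 ∧ PySem.List.pyGetD flist 0 0 * PySem.List.pyGetD flist 1 0 = n then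
    some [PySem.List.pyGetD flist 0 0, PySem.List.pyGetD flist 1 0]
  else
    (PySem.List.pyRange 0 (flist.length : Int) 1).findSome? fun i =>
      (PySem.List.pyRange (i + 1) (flist.length : Int) 1).findSome? fun j =>
        if PySem.List.pyGetD flist i 0 * PySem.List.pyGetD flist j 0 = n then
          some [PySem.List.pyGetD flist i 0, PySem.List.pyGetD flist j 0]
        else none

-- ===== PORT B =====
-- suffix = {}; for v in flist: suffix[v] = suffix.get(v, 0) + 1
def cfflBuild (flist : List Int) : PySem.Dict Int Int :=
  flist.foldl (fun d v => d.insert v (d.getD v 0 + 1)) PySem.Dict.empty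

-- the enumerate loop of Source B: decrement suffix[v], zero case, divisibility + lookup case
-- (rest ≠ [] is Source B's 'i + 1 < len(flist)', and rest.headD 0 is flist[i+1], exact here)
def cfflLoop (n : Int) : PySem.Dict Int Int → List Int → Option (List Int)
  | _, [] => none
  | suffix, v :: rest =>
    let suffix' := suffix.insert v (suffix.getD v 0 - 1)
    if v = 0 then
      if n = 0 ∧ rest ≠ [] then some [0, rest.headD 0]
      else cfflLoop n suffix' rest
    else if PySem.Int.mod n v = 0 ∧ 0 < suffix'.getD (PySem.Int.floordiv n v) 0 then
      some [v, PySem.Int.floordiv n v]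
    else cfflLoop n suffix' rest

def choose_factors_from_list_alt (n : Int) (flist : List Int) : Option (List Int) :=
  cfflLoop n (cfflBuild flist) flist

-- ===== PRECONDITION & SPEC =====
def Spec_choose_factors_from_list (n : Int) (flist : List Int) (out : Option (List Int)) : Prop := out = choose_factors_from_list_alt n flist
instance (n : Int) (flist : List Int) (out : Option (List Int)) : Decidable (Spec_choose_factors_from_list n flist out) := by unfold Spec_choose_factors_from_list; infer_instance

-- ===== CLAIM (what is proved, stated in full; the proofs are below) =====
def Claim_equal_choose_factors_from_list : Prop := ∀ (n : Int) (flist : List Int), Dom_choose_factors_from_list n flist → Spec_choose_factors_from_list n flist (choose_factors_from_list n flist)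

-- ===== LEMMAS AND PROOFS =====

-- reference form: first pair (in A's lexicographic index order) whose product is n
def cfflPairs (n : Int) : List Int → Option (List Int)
  | [] => none
  | v :: rest =>
    match rest.findSome? (fun w => if v * w = n then some [v, w] else none) with
    | some r => some r
    | none => cfflPairs n rest

theorem findSome?_const_none {α β : Type} (l : List α) :
    l.findSome? (fun _ => (none : Option β)) = none := by
  induction l with
  | nil => rfl
  | cons a l ih => simp [List.findSome?, ih]

theorem findSome?_eq_mem {α β : Type} [DecidableEq α] (l : List α) (q : α) (f : α → β) :
    l.findSome? (fun w => if w = q then some (f w) else none)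
      = if q ∈ l then some (f q) else none := by
  induction l with
  | nil => rfl
  | cons a l ih =>
    by_cases h : a = q
    · subst h; simp [List.findSome?]
    · simp [List.findSome?, h, ih, Ne.symm h]

-- == A's double loop equals cfflPairs ==

theorem inner_eq_drop (n : Int) (L : List Int) (v : Int) (a : Int) (ha : 0 ≤ a) :
    (PySem.List.pyRange (a : Int) (L.length : Int) 1).findSome?
        (fun j => if v * PySem.List.pyGetD L j 0 = n then
          some [v, PySem.List.pyGetD L j 0] else none)
      = (L.drop a.toNat).findSome? (fun w => if v * w = n then some [v, w] else none) := by
  have hm := PySem.List.map_pyGetD_pyRange L 0 ha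
  calc (PySem.List.pyRange a (L.length : Int) 1).findSome?
          (fun j => if v * PySem.List.pyGetD L j 0 = n then
            some [v, PySem.List.pyGetD L j 0] else none)
      = ((PySem.List.pyRange a (L.length : Int) 1).map
          (fun j => PySem.List.pyGetD L j 0)).findSome?
            (fun w => if v * w = n then some [v, w] else none) := by
        rw [List.findSome?_map]; rfl
    _ = (L.drop a.toNat).findSome? (fun w => if v * w = n then some [v, w] else none) := by
        rw [show PySem.List.pyRange a (L.length : Int) 1
              = PySem.List.pyRange a (PySem.List.len L) 1 from rfl] at *
        rw [hm]

theorem outer_eq_pairs (n : Int) (L : List Int) : ∀ (k : Nat),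
    (PySem.List.pyRange (k : Int) (L.length : Int) 1).findSome?
        (fun i => (PySem.List.pyRange (i + 1) (L.length : Int) 1).findSome?
          (fun j => if PySem.List.pyGetD L i 0 * PySem.List.pyGetD L j 0 = n then
            some [PySem.List.pyGetD L i 0, PySem.List.pyGetD L j 0] else none))
      = cfflPairs n (L.drop k) := by
  intro k
  induction hk : L.length - k generalizing k with
  | zero =>
    have hge : L.length ≤ k := by omega
    rw [PySem.List.pyRange_one_eq_nil (by exact_mod_cast hge),
        List.drop_eq_nil_of_le hge]
    rfl
  | succ m ih =>
    have hlt : k < L.length := by omega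
    rw [PySem.List.pyRange_one_cons (by exact_mod_cast hlt)]
    simp only [List.findSome?_cons]
    have hdrop : L.drop k = L[k] :: L.drop (k + 1) := (List.getElem_cons_drop hlt).symm
    have hv : PySem.List.pyGetD L (k : Int) 0 = L[k] := by
      rw [PySem.List.pyGetD_natCast, List.getD_eq_getElem L 0 hlt]
    have hinner := inner_eq_drop n L (PySem.List.pyGetD L (k : Int) 0) ((k : Int) + 1)
      (by positivity)
    have hto : ((k : Int) + 1).toNat = k + 1 := by omega
    rw [hto] at hinner
    have hcast : (k : Int) + 1 = ((k + 1 : Nat) : Int) := by push_cast; ring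
    rw [hinner, hv, hdrop, hcast]
    cases hfs : (L.drop (k+1)).findSome?
        (fun w => if L[k] * w = n then some [L[k], w] else none) with
    | some r => simp only [cfflPairs, hfs]
    | none =>
      simp only [cfflPairs, hfs]
      exact ih (k + 1) (by omega)

theorem portA_eq_pairs (n : Int) (L : List Int) :
    choose_factors_from_list n L = cfflPairs n L := by
  unfold choose_factors_from_list
  split_ifs with h
  · obtain ⟨hlen, hprod⟩ := h
    match L, hlen with
    | [a, b], _ =>
      simp [PySem.List.pyGetD, PySem.List.pyGet?, PySem.List.pyIdx?] at hprod ⊢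
      simp [cfflPairs, List.findSome?, hprod]
  · have h0 := outer_eq_pairs n L 0
    simpa using h0

-- == B's loop equals cfflPairs, given the suffix-count invariant ==

theorem loop_eq_pairs (n : Int) : ∀ (l : List Int) (d : PySem.Dict Int Int),
    (∀ x, d.getD x 0 = (l.count x : Int)) → cfflLoop n d l = cfflPairs n l := by
  intro l
  induction l with
  | nil => intro d _; rfl
  | cons v rest ih =>
    intro d hd
    have hd' : ∀ x, (d.insert v (d.getD v 0 - 1)).getD x 0 = (rest.count x : Int) := by
      intro x
      rw [PySem.Dict.getD_insert]
      by_cases hx : x = v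
      · rw [if_pos hx, hx, hd v]
        push_cast [List.count_cons_self]; ring
      · rw [if_neg hx, hd x]; simp [Ne.symm hx]
    show cfflLoop n d (v :: rest) = cfflPairs n (v :: rest)
    rw [cfflLoop]
    by_cases hv : v = 0
    · subst hv
      rw [if_pos rfl]
      by_cases hzero : n = 0 ∧ rest ≠ []
      · obtain ⟨hn, hne⟩ := hzero
        subst hn
        rw [if_pos ⟨rfl, hne⟩]
        match rest, hne with
        | w :: rest', _ =>
          simp [cfflPairs, List.findSome?]
      · rw [if_neg hzero]
        rcases Decidable.not_and_iff_not_or_not.mp hzero with hn | hne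
        · have hn' : ¬ (0:Int) = n := fun h => hn h.symm
          have hfun : (fun w => if (0:Int) * w = n then some [(0:Int), w] else none)
              = fun _ => (none : Option (List Int)) := by
            funext w; simp [hn']
          simp only [cfflPairs, hfun, findSome?_const_none]
          exact ih _ hd'
        · have hre : rest = [] := by
            by_contra hc; exact hne (fun h => hc h)
          subst hre
          simp only [cfflPairs, List.findSome?]
          exact ih _ hd'
    · rw [if_neg hv]
      by_cases hmod : PySem.Int.mod n v = 0
      · have hdvd : v ∣ n := (PySem.Int.mod_eq_zero_iff_dvd n v).mp hmod
        set q := PySem.Int.floordiv n v with hq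
        have hvq : v * q = n := Int.mul_fdiv_cancel' hdvd
        have hiff : ∀ w : Int, (v * w = n) ↔ (w = q) := by
          intro w
          constructor
          · intro hw
            have : v * w = v * q := by rw [hw, hvq]
            exact mul_left_cancel₀ hv this
          · intro hw; rw [hw, hvq]
        have hfun : (fun w => if v * w = n then some [v, w] else none)
            = fun w => if w = q then some [v, w] else none := by
          funext w; simp only [hiff w]
        have hcount : (d.insert v (d.getD v 0 - 1)).getD q 0 = (rest.count q : Int) := hd' q
        by_cases hmem : q ∈ rest
        · have hpos : 0 < (d.insert v (d.getD v 0 - 1)).getD q 0 := by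
            rw [hcount]
            exact_mod_cast List.count_pos_iff.mpr hmem
          rw [if_pos ⟨hmod, hpos⟩]
          simp only [cfflPairs, hfun, findSome?_eq_mem rest q (fun w => [v, w]), if_pos hmem]
        · have hnpos : ¬ 0 < (d.insert v (d.getD v 0 - 1)).getD q 0 := by
            rw [hcount, List.count_eq_zero.mpr hmem]
            simp
          rw [if_neg (fun h => hnpos h.2)]
          simp only [cfflPairs, hfun, findSome?_eq_mem rest q (fun w => [v, w]), if_neg hmem]
          exact ih _ hd'
      · have hndvd : ¬ v ∣ n := fun h => hmod ((PySem.Int.mod_eq_zero_iff_dvd n v).mpr h)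
        have hfun : (fun w => if v * w = n then some [v, w] else none)
            = fun _ => (none : Option (List Int)) := by
          funext w
          have : v * w ≠ n := fun h => hndvd ⟨w, h.symm⟩
          simp [this]
        rw [if_neg (fun h => hmod h.1)]
        simp only [cfflPairs, hfun, findSome?_const_none]
        exact ih _ hd'

theorem portB_eq_pairs (n : Int) (L : List Int) :
    choose_factors_from_list_alt n L = cfflPairs n L := by
  unfold choose_factors_from_list_alt
  apply loop_eq_pairs
  intro x
  unfold cfflBuild
  rw [PySem.Dict.foldl_insert_getD_add_one_eq_counter, PySem.Dict.getD_counter]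

-- ===== VERDICT (by name: the statement is the Claim_ definition above) =====
theorem choose_factors_from_list_spec : Claim_equal_choose_factors_from_list := by
  intro n flist _
  unfold Spec_choose_factors_from_list
  rw [portA_eq_pairs, portB_eq_pairs]
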